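-- pv_equiv track=rewrite | github.com/akhileshgandhi/quicksocialpython | scraper_agents/agents/visual.py | _resolve_fonts
-- ===== SOURCE A (Python) =====
-- from typing import Any, Dict, List, Optional
--
-- _ICON_FONT_KW = {"icon", "glyph", "symbol", "awesome", "icomoon", "material",
--                   "fontello", "fontisto", "ionicon", "feather", "linearicon"}
--
-- def _is_icon_font(name: str) -> bool:
--     """Return True if *name* looks like an icon/symbol font."""
--     low = name.lower()
--     return any(kw in low for kw in _ICON_FONT_KW)
--
-- def _resolve_fonts(
--     fonts: List[Dict[str, Any]],
-- ) -> tuple[Optional[str], Optional[str]]: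
--     """Pick headline and body fonts from the extracted font list.
--
--     Priority:
--     1. Fonts explicitly tagged with usage="heading" / usage="body"
--     2. First Google Fonts entry for headline, second for body
--     3. First two fonts in the list
--
--     Icon/symbol fonts (Glyphicons, FontAwesome, etc.) are always skipped.
--     """
--     headline_font: Optional[str] = None
--     body_font: Optional[str] = None
--
--     # Pass 1: look for explicit usage tags
--     for f in fonts:
--         usage = (f.get("usage") or "").lower()
--         family = f.get("family", "")
--         if not family or _is_icon_font(family):
--             continue
--         if usage == "heading" and not headline_font:
--             headline_font = family
--         elif usage == "body" and not body_font:
--             body_font = family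
--
--     # Pass 2: fallback to Google Fonts entries
--     if not headline_font or not body_font:
--         google_fonts = [
--             f["family"] for f in fonts
--             if f.get("source") == "google_fonts" and f.get("family")
--             and not _is_icon_font(f["family"])
--         ]
--         if not headline_font and google_fonts:
--             headline_font = google_fonts[0]
--         if not body_font and len(google_fonts) >= 2:
--             body_font = google_fonts[1]
--
--     # Pass 3: fallback to first available fonts
--     if not headline_font or not body_font:
--         all_families = [
--             f["family"] for f in fonts
--             if f.get("family") and not _is_icon_font(f["family"])
--         ]
--         if not headline_font and all_families:
--             headline_font = all_families[0]
--         if not body_font and len(all_families) >= 2: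
--             # Pick one that differs from headline
--             for fam in all_families:
--                 if fam != headline_font:
--                     body_font = fam
--                     break
--
--     return headline_font, body_font
-- ===== SOURCE B (Python) =====
-- _ICON_FONT_KW = {"icon", "glyph", "symbol", "awesome", "icomoon", "material",
--                   "fontello", "fontisto", "ionicon", "feather", "linearicon"}
--
-- def _is_icon_font(name: str) -> bool:
--     low = name.lower()
--     return any(kw in low for kw in _ICON_FONT_KW)
--
-- def _resolve_fonts(fonts):
--     # One gather pass: first tagged heading/body, ordered google families, ordered all families.
--     htag = None
--     btag = None
--     google = []
--     families = []
--     for f in fonts: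
--         fam = f.get("family", "")
--         if not fam or _is_icon_font(fam):
--             continue
--         usage = (f.get("usage") or "").lower()
--         if usage == "heading" and htag is None:
--             htag = fam
--         elif usage == "body" and btag is None:
--             btag = fam
--         if f.get("source") == "google_fonts":
--             google.append(fam)
--         families.append(fam)
--     # Pure selection step.
--     if htag is not None:
--         headline = htag
--     elif google:
--         headline = google[0]
--     else:
--         headline = families[0] if families else None
--     body = btag
--     if body is None and len(google) >= 2:
--         body = google[1]
--     if body is None and len(families) >= 2:
--         body = next((fam for fam in families if fam != headline), None)
--     return headline, body
-- ===== Notes on version B (the rewrite author's own statement) =====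
-- stated objective: simpler
-- what changed: Replaces A's three interleaved fallback passes (tag scan, conditional google-fonts comprehension, conditional all-families comprehension with in-place patching) by a single gather pass collecting tags and both family lists, followed by one pure selection step.
import Mathlib
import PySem

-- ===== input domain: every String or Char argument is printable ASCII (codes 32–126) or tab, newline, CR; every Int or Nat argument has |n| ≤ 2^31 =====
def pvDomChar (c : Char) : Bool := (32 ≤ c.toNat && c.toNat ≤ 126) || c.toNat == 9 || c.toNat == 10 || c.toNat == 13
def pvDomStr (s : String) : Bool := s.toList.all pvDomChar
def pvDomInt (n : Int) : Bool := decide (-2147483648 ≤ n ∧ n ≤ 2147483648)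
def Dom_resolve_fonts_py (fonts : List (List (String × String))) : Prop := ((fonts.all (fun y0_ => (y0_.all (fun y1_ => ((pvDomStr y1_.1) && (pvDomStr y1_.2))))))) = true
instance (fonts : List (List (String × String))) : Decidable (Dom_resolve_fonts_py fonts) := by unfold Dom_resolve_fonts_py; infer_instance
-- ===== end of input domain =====

-- B replaces A's three interleaved fallback passes by one gather pass plus a pure selection step (objective: simpler).


-- shared module helpers (the Python module's _ICON_FONT_KW / _is_icon_font, used by both A and B)
def pvIconKw : List String := ["icon", "glyph", "symbol", "awesome", "icomoon", "material",
  "fontello", "fontisto", "ionicon", "feather", "linearicon"]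

def pvIsIconFont (name : String) : Bool :=
  let low := PySem.Str.lower name
  pvIconKw.any (fun kw => PySem.Str.isIn kw low)

-- f.get(k, "") / (f.get(k) or "") on a dict of strings (only falsy str value is "")
def pvGetD (f : List (String × String)) (k : String) : String :=
  PySem.Dict.getD (PySem.Dict.mk f) k ""

-- f.get(k) == v
def pvGetEq (f : List (String × String)) (k v : String) : Bool :=
  PySem.Dict.get? (PySem.Dict.mk f) k == some v

-- ===== PORT A =====
-- pass 1 loop body of A
def pvStepA (st : Option String × Option String) (f : List (String × String)) :
    Option String × Option String :=
  let usage := PySem.Str.lower (pvGetD f "usage")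
  let family := pvGetD f "family"
  if family = "" ∨ pvIsIconFont family then st
  else if usage = "heading" ∧ st.1 = none then (some family, st.2)
  else if usage = "body" ∧ st.2 = none then (st.1, some family)
  else st

def resolve_fonts_py (fonts : List (List (String × String))) : Option String × Option String :=
  -- Pass 1: explicit usage tags
  let st := fonts.foldl pvStepA (none, none)
  let hf := st.1
  let bf := st.2
  -- Pass 2: fallback to Google Fonts entries
  let st2 :=
    if hf = none ∨ bf = none then
      let google := (fonts.filter (fun f =>
          pvGetEq f "source" "google_fonts" && pvGetD f "family" != "" &&
          !pvIsIconFont (pvGetD f "family"))).map (fun f => pvGetD f "family")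
      let hf2 := if hf = none then google.head? else hf
      let bf2 := if bf = none ∧ 2 ≤ google.length then google[1]? else bf
      (hf2, bf2)
    else (hf, bf)
  -- Pass 3: fallback to first available fonts
  if st2.1 = none ∨ st2.2 = none then
    let alls := (fonts.filter (fun f =>
        pvGetD f "family" != "" && !pvIsIconFont (pvGetD f "family"))).map (fun f => pvGetD f "family")
    let hf3 := if st2.1 = none then alls.head? else st2.1
    let bf3 := if st2.2 = none ∧ 2 ≤ alls.length then alls.find? (fun fam => fam != hf3.getD "") else st2.2
    (hf3, bf3)
  else st2

-- ===== PORT B =====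
-- gather-pass loop body of B: (first "heading" tag, first "body" tag, google families, all families)
def pvStepB (st : Option String × Option String × List String × List String)
    (f : List (String × String)) : Option String × Option String × List String × List String :=
  let fam := pvGetD f "family"
  if fam = "" ∨ pvIsIconFont fam then st
  else
    let usage := PySem.Str.lower (pvGetD f "usage")
    let tags :=
      if usage = "heading" ∧ st.1 = none then (some fam, st.2.1)
      else if usage = "body" ∧ st.2.1 = none then (st.1, some fam)
      else (st.1, st.2.1)
    let google := if pvGetEq f "source" "google_fonts" then st.2.2.1 ++ [fam] else st.2.2.1
    (tags.1, tags.2, google, st.2.2.2 ++ [fam])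

def resolve_fonts_py_alt (fonts : List (List (String × String))) : Option String × Option String :=
  let st := fonts.foldl pvStepB (none, none, [], [])
  let htag := st.1
  let btag := st.2.1
  let google := st.2.2.1
  let fams := st.2.2.2
  -- pure selection step
  let headline :=
    match htag with
    | some h => some h
    | none =>
      match google with
      | g :: _ => some g
      | [] => fams.head?
  let body1 := if btag = none ∧ 2 ≤ google.length then google[1]? else btag
  let body2 := if body1 = none ∧ 2 ≤ fams.length then fams.find? (fun fam => fam != headline.getD "") else body1
  (headline, body2)

-- ===== PRECONDITION & SPEC =====
def Spec_resolve_fonts_py (fonts : List (List (String × String))) (out : Option String × Option String) : Prop := out = resolve_fonts_py_alt fonts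
instance (fonts : List (List (String × String))) (out : Option String × Option String) : Decidable (Spec_resolve_fonts_py fonts out) := by unfold Spec_resolve_fonts_py; infer_instance

-- ===== CLAIM (what is proved, stated in full; the proofs are below) =====
def Claim_equal_resolve_fonts_py : Prop := ∀ (fonts : List (List (String × String))), Dom_resolve_fonts_py fonts → Spec_resolve_fonts_py fonts (resolve_fonts_py fonts)

-- ===== LEMMAS AND PROOFS =====

-- the two filtered family lists A's passes 2 and 3 build
def pvGoogleOf (fonts : List (List (String × String))) : List String :=
  (fonts.filter (fun f =>
      pvGetEq f "source" "google_fonts" && pvGetD f "family" != "" &&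
      !pvIsIconFont (pvGetD f "family"))).map (fun f => pvGetD f "family")

def pvAllOf (fonts : List (List (String × String))) : List String :=
  (fonts.filter (fun f =>
      pvGetD f "family" != "" && !pvIsIconFont (pvGetD f "family"))).map (fun f => pvGetD f "family")

-- B's single gather pass computes A's pass-1 state together with A's two filtered lists
lemma pvFoldB_eq (fonts : List (List (String × String))) (h b : Option String)
    (g a : List String) :
    fonts.foldl pvStepB (h, b, g, a) =
      ((fonts.foldl pvStepA (h, b)).1, (fonts.foldl pvStepA (h, b)).2,
       g ++ pvGoogleOf fonts, a ++ pvAllOf fonts) := by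
  induction fonts generalizing h b g a with
  | nil => simp [pvGoogleOf, pvAllOf]
  | cons f fs ih =>
    by_cases hskip : pvGetD f "family" = "" ∨ pvIsIconFont (pvGetD f "family") = true
    · have h1 : (pvGetD f "family" != "" && !pvIsIconFont (pvGetD f "family")) = false := by
        rcases hskip with h | h <;> simp [h]
      have h2 : (pvGetEq f "source" "google_fonts" && pvGetD f "family" != "" &&
          !pvIsIconFont (pvGetD f "family")) = false := by
        rcases hskip with h | h <;> simp [h]
      simp only [List.foldl_cons, pvStepB, pvStepA, if_pos hskip, ih,
        pvGoogleOf, pvAllOf, List.filter_cons, h1, h2, if_false, Bool.false_eq_true]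
    · have hfam : ¬ pvGetD f "family" = "" := fun hc => hskip (Or.inl hc)
      have hic : ¬ pvIsIconFont (pvGetD f "family") = true := fun hc => hskip (Or.inr hc)
      have h1 : (pvGetD f "family" != "" && !pvIsIconFont (pvGetD f "family")) = true := by
        simp [hfam, hic]
      by_cases hsrc : pvGetEq f "source" "google_fonts" = true
      · have h2 : (pvGetEq f "source" "google_fonts" && pvGetD f "family" != "" &&
            !pvIsIconFont (pvGetD f "family")) = true := by simp [hfam, hic, hsrc]
        simp only [List.foldl_cons, pvStepB, pvStepA, if_neg hskip, if_pos hsrc, ih,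
          pvGoogleOf, pvAllOf, List.filter_cons, h1, h2, if_true, List.map_cons,
          List.append_assoc, List.singleton_append, Prod.mk.eta]
      · have h2 : (pvGetEq f "source" "google_fonts" && pvGetD f "family" != "" &&
            !pvIsIconFont (pvGetD f "family")) = false := by simp [hsrc]
        simp only [List.foldl_cons, pvStepB, pvStepA, if_neg hskip, if_neg hsrc, ih,
          pvGoogleOf, pvAllOf, List.filter_cons, h1, h2, if_true, if_false, List.map_cons,
          List.append_assoc, List.singleton_append, Bool.false_eq_true, Prod.mk.eta]

-- the two selection steps agree for any pass-1 state and filtered lists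
lemma pvSel_eq (h1 b1 : Option String) (G F : List String) :
    (let st2 :=
      if h1 = none ∨ b1 = none then
        ((if h1 = none then G.head? else h1),
         (if b1 = none ∧ 2 ≤ G.length then G[1]? else b1))
      else (h1, b1)
     if st2.1 = none ∨ st2.2 = none then
       let hf3 := if st2.1 = none then F.head? else st2.1
       (hf3, if st2.2 = none ∧ 2 ≤ F.length then F.find? (fun fam => fam != hf3.getD "") else st2.2)
     else st2)
    =
    (let headline :=
      match h1 with
      | some h => some h
      | none => match G with
        | g :: _ => some g
        | [] => F.head?
     let body1 := if b1 = none ∧ 2 ≤ G.length then G[1]? else b1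
     let body2 := if body1 = none ∧ 2 ≤ F.length then F.find? (fun fam => fam != headline.getD "") else body1
     (headline, body2)) := by
  rcases h1 with _ | x <;> rcases b1 with _ | y <;>
    rcases G with _ | ⟨g0, _ | ⟨g1, gr⟩⟩ <;> rcases F with _ | ⟨f0, _ | ⟨f1, fr⟩⟩ <;>
    simp [List.length_cons]

theorem resolve_fonts_py_spec : Claim_equal_resolve_fonts_py := by
  intro fonts _
  show resolve_fonts_py fonts = resolve_fonts_py_alt fonts
  have hA : resolve_fonts_py fonts =
      (let st := fonts.foldl pvStepA (none, none)
       let st2 :=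
        if st.1 = none ∨ st.2 = none then
          ((if st.1 = none then (pvGoogleOf fonts).head? else st.1),
           (if st.2 = none ∧ 2 ≤ (pvGoogleOf fonts).length then (pvGoogleOf fonts)[1]? else st.2))
        else (st.1, st.2)
       if st2.1 = none ∨ st2.2 = none then
         let hf3 := if st2.1 = none then (pvAllOf fonts).head? else st2.1
         (hf3, if st2.2 = none ∧ 2 ≤ (pvAllOf fonts).length then
            (pvAllOf fonts).find? (fun fam => fam != hf3.getD "") else st2.2)
       else st2) := rfl
  have hB : resolve_fonts_py_alt fonts =
      (let st := fonts.foldl pvStepA (none, none)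
       let headline :=
        match st.1 with
        | some h => some h
        | none => match pvGoogleOf fonts with
          | g :: _ => some g
          | [] => (pvAllOf fonts).head?
       let body1 := if st.2 = none ∧ 2 ≤ (pvGoogleOf fonts).length then (pvGoogleOf fonts)[1]? else st.2
       let body2 := if body1 = none ∧ 2 ≤ (pvAllOf fonts).length then
          (pvAllOf fonts).find? (fun fam => fam != headline.getD "") else body1
       (headline, body2)) := by
    show resolve_fonts_py_alt fonts = _
    simp only [resolve_fonts_py_alt, pvFoldB_eq, List.nil_append]
  rw [hA, hB]
  have := pvSel_eq (fonts.foldl pvStepA (none, none)).1 (fonts.foldl pvStepA (none, none)).2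
    (pvGoogleOf fonts) (pvAllOf fonts)
  simpa using this
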